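-- pv_equiv track=rewrite | github.com/OneIdentity/ansible-privilege-manager | plugins/modules/software_pkgs.py | check_mode
-- ===== SOURCE A (Python) =====
-- MODE_CHOICES = ['all', 'server', 'pmpolicy', 'sudo']
--
-- PKG_SUB_DIRS = {
--     'server': 'server',
--     'pmpolicy': 'agent',
--     'sudo': 'sudo_plugin'
-- }
--
-- def check_mode(mode):
--     """
--     Check mode and return sub directories
--     """
--
--     # Return value
--     err = None
--     sub_dirs = []
--
--     # Mode is valid
--     if mode in MODE_CHOICES:
--         if mode == 'all':
--             for m in MODE_CHOICES[1:]:
--                 sub_dirs += [PKG_SUB_DIRS[m]]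
--         else:
--             sub_dirs = [PKG_SUB_DIRS[mode]]
--
--     # Invalid mode
--     else:
--         err = 'mode ' + mode + ' is not a valid mode, valid modes are: ' + ', '.join(PKG_SUB_DIRS.keys())
--
--     # Return
--     return err, sub_dirs
-- ===== SOURCE B (Python) =====
-- MODE_CHOICES = ['all', 'server', 'pmpolicy', 'sudo']
--
-- PKG_SUB_DIRS = {
--     'server': 'server',
--     'pmpolicy': 'agent',
--     'sudo': 'sudo_plugin'
-- }
--
-- # One table mapping each valid mode directly to its sub-directory list.
-- MODE_TABLE = {
--     'all': ['server', 'agent', 'sudo_plugin'],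
--     'server': ['server'],
--     'pmpolicy': ['agent'],
--     'sudo': ['sudo_plugin'],
-- }
--
-- def check_mode(mode):
--     """
--     Check mode and return sub directories
--     """
--     if mode in MODE_TABLE:
--         return None, list(MODE_TABLE[mode])
--     return 'mode ' + mode + ' is not a valid mode, valid modes are: ' + ', '.join(PKG_SUB_DIRS.keys()), []
-- ===== Notes on version B (the rewrite author's own statement) =====
-- stated objective: simpler
-- what changed: Replaces the membership test, the inner loop over MODE_CHOICES[1:] for the aggregate mode, and the per-mode PKG_SUB_DIRS branch with a single precomputed mode-to-subdirectories table and one lookup.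
import Mathlib
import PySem

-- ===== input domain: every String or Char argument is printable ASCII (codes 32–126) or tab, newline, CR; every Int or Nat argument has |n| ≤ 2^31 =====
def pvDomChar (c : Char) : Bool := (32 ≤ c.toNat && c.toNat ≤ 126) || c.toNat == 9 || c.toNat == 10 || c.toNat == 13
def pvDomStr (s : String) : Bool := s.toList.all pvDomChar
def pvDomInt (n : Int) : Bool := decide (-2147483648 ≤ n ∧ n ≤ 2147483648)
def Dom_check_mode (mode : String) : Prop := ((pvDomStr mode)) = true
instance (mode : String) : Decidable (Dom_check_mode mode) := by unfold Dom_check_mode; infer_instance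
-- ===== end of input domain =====

-- B replaces A's membership test + 'all' loop + per-mode dict lookup by a single
-- precomputed mode -> sub_dirs table and one lookup (objective: simpler).

-- ===== PORT A =====
def MODE_CHOICES : List String := ["all", "server", "pmpolicy", "sudo"]

def PKG_SUB_DIRS : PySem.Dict String String :=
  PySem.Dict.ofList [("server", "server"), ("pmpolicy", "agent"), ("sudo", "sudo_plugin")]

def check_mode (mode : String) : Option String × List String :=
  let err : Option String := none
  let sub_dirs : List String := []
  if mode ∈ MODE_CHOICES then
    if mode = "all" then
      let sub_dirs :=
        (MODE_CHOICES.drop 1).foldl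
          (fun acc m => acc ++ [(PKG_SUB_DIRS.get? m).getD ""]) sub_dirs
      (err, sub_dirs)
    else
      (err, [(PKG_SUB_DIRS.get? mode).getD ""])
  else
    (some ("mode " ++ mode ++ " is not a valid mode, valid modes are: " ++
      PySem.Str.join ", " PKG_SUB_DIRS.keys), sub_dirs)

-- ===== PORT B =====
def MODE_TABLE : PySem.Dict String (List String) :=
  PySem.Dict.ofList
    [("all", ["server", "agent", "sudo_plugin"]),
     ("server", ["server"]),
     ("pmpolicy", ["agent"]),
     ("sudo", ["sudo_plugin"])]

def check_mode_alt (mode : String) : Option String × List String :=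
  match MODE_TABLE.get? mode with
  | some l => (none, l)
  | none =>
    (some ("mode " ++ mode ++ " is not a valid mode, valid modes are: " ++
      PySem.Str.join ", " PKG_SUB_DIRS.keys), [])

-- ===== PRECONDITION & SPEC =====
def Spec_check_mode (mode : String) (out : Option String × List String) : Prop := out = check_mode_alt mode
instance (mode : String) (out : Option String × List String) : Decidable (Spec_check_mode mode out) := by unfold Spec_check_mode; infer_instance

-- ===== CLAIM (what is proved, stated in full; the proofs are below) =====
def Claim_equal_check_mode : Prop := ∀ (mode : String), Dom_check_mode mode → Spec_check_mode mode (check_mode mode)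

-- ===== LEMMAS AND PROOFS =====

-- ===== VERDICT (by name: the statement is the Claim_ definition above) =====
theorem check_mode_spec : Claim_equal_check_mode := by
  intro mode _
  show check_mode mode = check_mode_alt mode
  by_cases h1 : mode = "all"
  · subst h1; rfl
  by_cases h2 : mode = "server"
  · subst h2; rfl
  by_cases h3 : mode = "pmpolicy"
  · subst h3; rfl
  by_cases h4 : mode = "sudo"
  · subst h4; rfl
  have hm : mode ∉ MODE_CHOICES := by
    intro hmem
    rcases List.mem_cons.mp hmem with h | hmem
    · exact h1 h
    rcases List.mem_cons.mp hmem with h | hmem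
    · exact h2 h
    rcases List.mem_cons.mp hmem with h | hmem
    · exact h3 h
    rcases List.mem_cons.mp hmem with h | hmem
    · exact h4 h
    exact List.not_mem_nil hmem
  have b1 : ("all" == mode) = false := beq_eq_false_iff_ne.mpr (fun h => h1 h.symm)
  have b2 : ("server" == mode) = false := beq_eq_false_iff_ne.mpr (fun h => h2 h.symm)
  have b3 : ("pmpolicy" == mode) = false := beq_eq_false_iff_ne.mpr (fun h => h3 h.symm)
  have b4 : ("sudo" == mode) = false := beq_eq_false_iff_ne.mpr (fun h => h4 h.symm)
  have ht : MODE_TABLE.get? mode = none := by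
    have hmk : MODE_TABLE = PySem.Dict.mk
        [("all", ["server", "agent", "sudo_plugin"]), ("server", ["server"]),
         ("pmpolicy", ["agent"]), ("sudo", ["sudo_plugin"])] := rfl
    rw [hmk, PySem.Dict.get?_mk_cons, PySem.Dict.get?_mk_cons, PySem.Dict.get?_mk_cons,
      PySem.Dict.get?_mk_cons, b1, b2, b3, b4]
    rfl
  unfold check_mode check_mode_alt
  rw [if_neg hm, ht]
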